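-- pv_equiv track=rewrite | github.com/khanhptnk/iliad | code/tasks/NAV/trainers/iliad.py | _remove_loops_in_paths
-- ===== SOURCE A (Python) =====
-- def _remove_loops_in_paths(paths):
--     new_paths = []
--     for path in paths:
--         new_path = []
--         visited_viewpoints = set()
--         for u in path:
--             if u in visited_viewpoints:
--                 while new_path:
--                     v = new_path.pop()
--                     visited_viewpoints.remove(v)
--                     if v == u:
--                         break
--             visited_viewpoints.add(u)
--             new_path.append(u)
--         new_paths.append(new_path)
--     return new_paths
-- ===== SOURCE B (Python) =====
-- def _remove_loops_in_paths(paths):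
--     new_paths = []
--     for path in paths:
--         new_path = []
--         pos = {}
--         for u in path:
--             i = pos.get(u)
--             if i is not None:
--                 for v in new_path[i:]:
--                     del pos[v]
--                 new_path = new_path[:i]
--             new_path.append(u)
--             pos[u] = len(new_path) - 1
--         new_paths.append(new_path)
--     return new_paths
-- ===== Notes on version B (the rewrite author's own statement) =====
-- stated objective: alternative
-- what changed: Replaces A's set-of-visited plus element-by-element pop-while loop with a dict mapping each viewpoint to its index in the current path: a repeat jumps directly to the stored index, truncates the path with one slice and deletes the truncated viewpoints' dict entries.
import Mathlib
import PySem

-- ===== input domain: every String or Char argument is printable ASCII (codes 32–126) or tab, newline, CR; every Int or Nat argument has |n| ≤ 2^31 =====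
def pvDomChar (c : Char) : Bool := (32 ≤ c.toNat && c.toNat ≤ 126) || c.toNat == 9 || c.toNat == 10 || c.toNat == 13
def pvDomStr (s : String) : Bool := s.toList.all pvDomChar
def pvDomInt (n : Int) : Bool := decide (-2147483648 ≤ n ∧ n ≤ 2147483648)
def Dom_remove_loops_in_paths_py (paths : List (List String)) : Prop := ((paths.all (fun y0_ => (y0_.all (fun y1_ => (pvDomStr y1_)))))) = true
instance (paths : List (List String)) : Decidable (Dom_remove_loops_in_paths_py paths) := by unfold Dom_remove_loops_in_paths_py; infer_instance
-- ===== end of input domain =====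

-- B replaces A's per-element pop-while loop by a dict viewpoint→index: on a repeat it jumps straight
-- to the stored index, slices the tail off in one step and drops the tail's dict entries (alternative decomposition).

-- ===== PORT A =====
-- A's inner 'while new_path: v = new_path.pop(); visited.remove(v); if v == u: break'.
-- set.remove's KeyError is unreachable here (visited always contains every element of new_path),
-- so the removal is ported as Set.discard, which is exact on that invariant.
def pvAPop (u : String) (stack : List String) (vis : PySem.Set String) : List String × PySem.Set String :=
  if h : stack = [] then (stack, vis)
  else
    let v := stack.getLast h
    let rest := stack.dropLast
    let vis' := PySem.Set.discard vis v
    if v = u then (rest, vis') else pvAPop u rest vis'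
termination_by stack.length
decreasing_by
  have := List.length_pos_of_ne_nil h
  simp [List.length_dropLast]; omega

-- one iteration of A's 'for u in path' body over the state (new_path, visited_viewpoints)
def pvAStep (s : List String × PySem.Set String) (u : String) : List String × PySem.Set String :=
  let s := if PySem.Set.contains s.2 u then pvAPop u s.1 s.2 else s
  (s.1 ++ [u], PySem.Set.add s.2 u)

def remove_loops_in_paths_py (paths : List (List String)) : List (List String) :=
  paths.foldl (fun new_paths path =>
    new_paths ++ [(path.foldl pvAStep ([], PySem.Set.empty)).1]) []

-- ===== PORT B =====
-- one iteration of B's 'for u in path' body over the state (new_path, pos)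
def pvBStep (s : List String × PySem.Dict String Int) (u : String) : List String × PySem.Dict String Int :=
  match PySem.Dict.get? s.2 u with
  | some i =>
    let removed := PySem.List.slice s.1 (some i) none          -- new_path[i:]
    let pos := removed.foldl (fun d v => PySem.Dict.erase d v) s.2
    let new_path := PySem.List.slice s.1 none (some i) ++ [u]  -- new_path[:i] + [u]
    (new_path, PySem.Dict.insert pos u ((new_path.length : Int) - 1))
  | none =>
    let new_path := s.1 ++ [u]
    (new_path, PySem.Dict.insert s.2 u ((new_path.length : Int) - 1))

def remove_loops_in_paths_py_alt (paths : List (List String)) : List (List String) :=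
  paths.foldl (fun new_paths path =>
    new_paths ++ [(path.foldl pvBStep ([], PySem.Dict.empty)).1]) []

-- ===== PRECONDITION & SPEC =====
def Spec_remove_loops_in_paths_py (paths : List (List String)) (out : List (List String)) : Prop := out = remove_loops_in_paths_py_alt paths
instance (paths : List (List String)) (out : List (List String)) : Decidable (Spec_remove_loops_in_paths_py paths out) := by unfold Spec_remove_loops_in_paths_py; infer_instance

-- ===== CLAIM (what is proved, stated in full; the proofs are below) =====
def Claim_equal_remove_loops_in_paths_py : Prop := ∀ (paths : List (List String)), Dom_remove_loops_in_paths_py paths → Spec_remove_loops_in_paths_py paths (remove_loops_in_paths_py paths)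

-- ===== LEMMAS AND PROOFS =====

-- relation between A's and B's loop states: same new_path (nodup), visited = its elements,
-- pos maps each viewpoint to its first (= only) index in new_path
def pvRel (a : List String × PySem.Set String) (b : List String × PySem.Dict String Int) : Prop :=
  b.1 = a.1 ∧ a.1.Nodup ∧ (∀ w, w ∈ a.2 ↔ w ∈ a.1) ∧
  (∀ w, b.2.get? w = Option.map (fun (k : Nat) => (k : Int)) (List.idxOf? w a.1))

theorem pv_mem_foldl_discard (l : List String) (s : PySem.Set String) (w : String) :
    w ∈ l.foldl (fun s v => PySem.Set.discard s v) s ↔ w ∈ s ∧ w ∉ l := by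
  induction l generalizing s with
  | nil => simp
  | cons x t ih =>
    simp only [List.foldl_cons, ih, PySem.Set.mem_discard, List.mem_cons]
    tauto

theorem pv_find?_filter_ne (l : List (String × Int)) (k w : String) :
    List.find? (fun p => p.1 == w) (l.filter (fun p => !(p.1 == k))) =
      if w = k then none else List.find? (fun p => p.1 == w) l := by
  induction l with
  | nil => simp
  | cons a t ih =>
    by_cases hak : a.1 = k
    · by_cases hwk : w = k
      · simp [hak, hwk]
      · have hne : (a.1 == w) = false := by
          rw [beq_eq_false_iff_ne, hak]
          exact fun h => hwk h.symm
        have hkw : (k == w) = false := by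
          rw [beq_eq_false_iff_ne]
          exact fun h => hwk h.symm
        simp [hak, ih, hwk, hkw]
    · by_cases haw : a.1 = w
      · have hwk : ¬ w = k := fun h => hak (by rw [haw, h])
        simp [haw, hwk]
      · simp [hak, haw, ih]

theorem pv_get?_erase (d : PySem.Dict String Int) (k w : String) :
    (d.erase k).get? w = if w = k then none else d.get? w := by
  cases d with
  | mk items =>
    simp only [PySem.Dict.get?, PySem.Dict.erase]
    rw [pv_find?_filter_ne items k w]
    split_ifs <;> simp

theorem pv_get?_foldl_erase (l : List String) (d : PySem.Dict String Int) (w : String) :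
    (l.foldl (fun d v => PySem.Dict.erase d v) d).get? w =
      if w ∈ l then none else d.get? w := by
  induction l generalizing d with
  | nil => simp
  | cons x t ih =>
    simp only [List.foldl_cons, ih, pv_get?_erase, List.mem_cons]
    by_cases hw : w ∈ t <;> by_cases hx : w = x <;> simp [hw, hx]

theorem pv_idxOf?_append_left (w : String) (pre l : List String) (h : w ∈ pre) :
    List.idxOf? w (pre ++ l) = List.idxOf? w pre := by
  induction pre with
  | nil => simp at h
  | cons a t ih =>
    by_cases haw : a = w
    · simp [List.idxOf?_cons, haw]
    · have hwt : w ∈ t := by simp at h; tauto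
      simp [List.idxOf?_cons, haw, ih hwt]

theorem pv_idxOf?_append_self (u : String) (pre : List String) (h : u ∉ pre) :
    List.idxOf? u (pre ++ [u]) = some pre.length := by
  induction pre with
  | nil => simp [List.idxOf?_cons]
  | cons a t ih =>
    have hau : ¬ (a = u) := by intro he; exact h (by simp [he])
    have hut : u ∉ t := fun hm => h (by simp [hm])
    simp [List.idxOf?_cons, hau, ih hut]

-- A's pop loop on a stack pre ++ u :: suf (u not in suf) truncates to pre and discards u::suf from the set
theorem pvAPop_spec (u : String) (pre suf : List String) (vis : PySem.Set String) (h : u ∉ suf) :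
    pvAPop u (pre ++ u :: suf) vis =
      (pre, (u :: suf).reverse.foldl (fun s v => PySem.Set.discard s v) vis) := by
  induction suf using List.reverseRecOn generalizing vis with
  | nil =>
    rw [pvAPop]
    simp
  | append_singleton s b ih =>
    have hb : b ≠ u := by intro he; exact h (by simp [he])
    have hus : u ∉ s := fun hm => h (by simp [hm])
    have hshape : pre ++ u :: (s ++ [b]) = (pre ++ u :: s) ++ [b] := by simp
    rw [hshape, pvAPop]
    rw [dif_neg (by simp : ¬ ((pre ++ u :: s) ++ [b] = []))]
    simp only [List.getLast_concat, List.dropLast_concat]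
    rw [if_neg hb, ih _ hus]
    simp

theorem pvRel_step (a : List String × PySem.Set String) (b : List String × PySem.Dict String Int)
    (u : String) (h : pvRel a b) : pvRel (pvAStep a u) (pvBStep b u) := by
  obtain ⟨np, vis⟩ := a
  obtain ⟨np', pos⟩ := b
  obtain ⟨heq, hnd, hvis, hpos⟩ := h
  simp only at heq hnd hvis hpos
  subst np'
  unfold pvRel
  by_cases hmem : u ∈ np
  · -- u already on the stack: A pops back to u's index, B truncates there
    obtain ⟨k, hk⟩ : ∃ k, List.idxOf? u np = some k := by
      cases hidx : List.idxOf? u np with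
      | none => exact absurd (List.idxOf?_eq_none_iff.1 hidx) (by simpa using hmem)
      | some k => exact ⟨k, rfl⟩
    obtain ⟨hklt, hknp, hkmin⟩ := List.idxOf?_eq_some_iff.1 hk
    set pre := np.take k with hpre
    set suf := np.drop (k + 1) with hsuf
    have hpreLen : pre.length = k := by simp [hpre, Nat.le_of_lt hklt]
    have hdecomp : np = pre ++ u :: suf := by
      rw [hpre, hsuf, ← hknp, List.getElem_cons_drop, List.take_append_drop]
    have hupre : u ∉ pre := by
      intro hup
      obtain ⟨j, hj, hjv⟩ := List.getElem_of_mem hup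
      have hjk : j < k := hpreLen ▸ hj
      exact hkmin j hjk (by simpa [hpre, List.getElem_take] using hjv)
    have hndpre : pre.Nodup := (List.take_sublist k np).nodup hnd
    have hnd' := hdecomp ▸ hnd
    have husuf : u ∉ suf := by
      have hcs := (List.nodup_append.1 hnd').2.1
      exact (List.nodup_cons.1 hcs).1
    have hdisjoint := List.disjoint_of_nodup_append hnd'
    have hdisj : ∀ x ∈ pre, ¬(x = u ∨ x ∈ suf) := by
      intro x hx hor
      exact hdisjoint hx (by simpa using hor)
    have hmemnp : ∀ x, x ∈ np ↔ x ∈ pre ∨ x = u ∨ x ∈ suf := by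
      intro x; rw [hdecomp]; simp
    have hcontu : PySem.Set.contains vis u = true :=
      (PySem.Set.contains_iff vis u).2 ((hvis u).2 hmem)
    have hApop : pvAPop u np vis =
        (pre, (u :: suf).reverse.foldl (fun s v => PySem.Set.discard s v) vis) := by
      rw [hdecomp]; exact pvAPop_spec u pre suf vis husuf
    have hget : PySem.Dict.get? pos u = some ((k : Nat) : Int) := by simp [hpos u, hk]
    have hrem : PySem.List.slice np (some ((k : Nat) : Int)) none = u :: suf := by
      rw [PySem.List.slice_from_natCast, hsuf, ← List.getElem_cons_drop hklt, hknp]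
    have htake : PySem.List.slice np none (some ((k : Nat) : Int)) = pre := by
      rw [PySem.List.slice_to_natCast, hpre]
    have hA : pvAStep (np, vis) u =
        (pre ++ [u],
          PySem.Set.add ((u :: suf).reverse.foldl (fun s v => PySem.Set.discard s v) vis) u) := by
      simp only [pvAStep]
      rw [if_pos hcontu, hApop]
    have hB : pvBStep (np, pos) u =
        (pre ++ [u],
          PySem.Dict.insert ((u :: suf).foldl (fun d v => PySem.Dict.erase d v) pos) u
            (((pre ++ [u]).length : Int) - 1)) := by
      simp only [pvBStep]
      rw [hget]
      simp only [hrem, htake]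
    refine ⟨?_, ?_, ?_, ?_⟩
    · rw [hA, hB]
    · rw [hA]
      simp [List.nodup_append, hndpre]
      intro a ha hau
      exact hupre (hau ▸ ha)
    · intro w
      rw [hA]
      simp only [PySem.Set.mem_add, pv_mem_foldl_discard, List.mem_reverse, List.mem_cons,
        List.mem_append, hvis w, hmemnp w]
      have := hdisj w
      tauto
    · intro w
      rw [hA, hB]
      by_cases hwu : w = u
      · subst hwu
        rw [PySem.Dict.get?_insert_self, pv_idxOf?_append_self w pre hupre]
        simp only [Option.map_some, Option.some.injEq, List.length_append,
          List.length_singleton]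
        push_cast
        ring
      · rw [PySem.Dict.get?_insert_of_ne _ _ hwu, pv_get?_foldl_erase]
        by_cases hws : w ∈ u :: suf
        · rw [if_pos hws]
          have hwpre : w ∉ pre := fun hwp => hdisj w hwp (by simpa [hwu] using hws)
          rw [Option.map_eq_none_iff.2 (List.idxOf?_eq_none_iff.2 (by simp [hwpre, hwu]))]
        · rw [if_neg hws, hpos w]
          by_cases hwpre : w ∈ pre
          · rw [hdecomp, pv_idxOf?_append_left w pre _ hwpre, pv_idxOf?_append_left w pre _ hwpre]
          · have hwnp : w ∉ np := by
              rw [hmemnp w]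
              simp only [List.mem_cons] at hws
              tauto
            rw [List.idxOf?_eq_none_iff.2 hwnp,
              List.idxOf?_eq_none_iff.2 (by simp [hwpre, hwu])]
  · -- u new: both append
    have hcontu : ¬ PySem.Set.contains vis u = true :=
      fun hc => hmem ((hvis u).1 ((PySem.Set.contains_iff vis u).1 hc))
    have hget : PySem.Dict.get? pos u = none := by
      simp [hpos u, List.idxOf?_eq_none_iff.2 hmem]
    have hA : pvAStep (np, vis) u = (np ++ [u], PySem.Set.add vis u) := by
      simp only [pvAStep]
      rw [if_neg hcontu]
    have hB : pvBStep (np, pos) u =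
        (np ++ [u], PySem.Dict.insert pos u (((np ++ [u]).length : Int) - 1)) := by
      simp only [pvBStep]
      rw [hget]
    refine ⟨?_, ?_, ?_, ?_⟩
    · rw [hA, hB]
    · rw [hA]
      simp [List.nodup_append, hnd]
      intro a ha hau
      exact hmem (hau ▸ ha)
    · intro w
      rw [hA]
      simp only [PySem.Set.mem_add, List.mem_append, List.mem_singleton, hvis w]
    · intro w
      rw [hA, hB]
      by_cases hwu : w = u
      · subst hwu
        rw [PySem.Dict.get?_insert_self, pv_idxOf?_append_self w np hmem]
        simp only [Option.map_some, Option.some.injEq, List.length_append,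
          List.length_singleton]
        push_cast
        ring
      · rw [PySem.Dict.get?_insert_of_ne _ _ hwu, hpos w]
        by_cases hwnp : w ∈ np
        · rw [pv_idxOf?_append_left w np _ hwnp]
        · rw [List.idxOf?_eq_none_iff.2 hwnp,
            List.idxOf?_eq_none_iff.2 (by simp [hwnp, hwu])]

theorem pvRel_foldl (path : List String) (a : List String × PySem.Set String)
    (b : List String × PySem.Dict String Int) (h : pvRel a b) :
    pvRel (path.foldl pvAStep a) (path.foldl pvBStep b) := by
  induction path generalizing a b with
  | nil => exact h
  | cons u t ih => exact ih _ _ (pvRel_step a b u h)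

theorem pv_inner_eq (path : List String) :
    (path.foldl pvBStep ([], PySem.Dict.empty)).1 = (path.foldl pvAStep ([], PySem.Set.empty)).1 :=
  (pvRel_foldl path ([], PySem.Set.empty) ([], PySem.Dict.empty)
    ⟨rfl, List.nodup_nil, by simp [PySem.Set.empty], by simp⟩).1

theorem pv_outer_eq (paths : List (List String)) (acc : List (List String)) :
    paths.foldl (fun new_paths path => new_paths ++ [(path.foldl pvAStep ([], PySem.Set.empty)).1]) acc =
    paths.foldl (fun new_paths path => new_paths ++ [(path.foldl pvBStep ([], PySem.Dict.empty)).1]) acc := by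
  induction paths generalizing acc with
  | nil => rfl
  | cons p t ih => simp only [List.foldl_cons, pv_inner_eq, ih]

-- ===== VERDICT (by name: the statement is the Claim_ definition above) =====
theorem remove_loops_in_paths_py_spec : Claim_equal_remove_loops_in_paths_py := by
  intro paths _
  unfold Spec_remove_loops_in_paths_py remove_loops_in_paths_py remove_loops_in_paths_py_alt
  exact pv_outer_eq paths []
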